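-- pv_equiv track=rewrite | github.com/spooki2/Asel | Asel003/AselClass.py | aselDecrypt
-- ===== SOURCE A (Python) =====
-- def prepareKey(data, key):  # prepares the key value so that it can be seperated to equal segments
--     keyStr = str(key)
--     dataStr = str(data)
--     keyLen = len(keyStr)
--     dataLen = len(dataStr)
--     modKD = keyLen % dataLen
--
--     # makes the key repeat its start till it has a % value of 0
--     i = 0
--     while modKD != 0:
--         keyStr += keyStr[i]
--         modKD = len(keyStr) % len(dataStr)
--         i += 1
--     keyLen = len(keyStr)
--     dataLen = len(dataStr)
--
--     # seperates the key to  equally long data character lists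
--     # example:
--     # does : ['12', '34', '56', '78', '90', '12']
--     # for hello ('h', 'e', 'l', 'l', 'o', 'o')
--     keyList = []
--     chunkSize = int(keyLen / dataLen)
--     run = 0
--     while run != keyLen:
--         keyChunk = keyStr[run:run + chunkSize]
--         keyList.append(keyChunk)
--         run += chunkSize
--
--     # reformat keylist with its unicode count per letter:
--     ordKeyList = []
--     for keyChunk in keyList:
--         ordChunk = 0
--         for char in keyChunk:
--             ordChunk += ord(char)
--         ordKeyList.append(ordChunk)
--     return ordKeyList
--
-- def aselDecrypt(data, key):
--     keyStr = str(key)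
--     dataStr = str(data)
--
--     ordKeyList = prepareKey(dataStr, keyStr)
--     # per each letter (member of dataLst), turn to number [ord()] and subtract (decryption)
--     combinedList = []
--     for char, val in zip(dataStr, ordKeyList):
--         combinedList.append(ord(char) - val)
--
--     # back to text (might not render chars on python console?)
--     encryptedData = ""
--     for val in combinedList:
--         encryptedData += chr(val)
--     return encryptedData
-- ===== SOURCE B (Python) =====
-- def aselDecrypt(data, key):
--     # Prefix-sum re-implementation: the padded key's j-th char is keyStr[j % keyLen],
--     # so each chunk's ord-sum is a difference of two entries of one prefix-sum table.
--     keyStr = str(key)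
--     dataStr = str(data)
--     dataLen = len(dataStr)
--     keyLen = len(keyStr)
--     paddedLen = keyLen + (dataLen - keyLen % dataLen) % dataLen
--     chunkSize = paddedLen // dataLen
--     P = [0]
--     for t in range(paddedLen):
--         P.append(P[-1] + ord(keyStr[t % keyLen]))
--     # dataStr[:paddedLen] is all of dataStr when the key is non-empty (paddedLen is then
--     # a positive multiple of dataLen) and empty when the key is empty, like A's zip.
--     return ''.join(chr(ord(c) - (P[(i + 1) * chunkSize] - P[i * chunkSize]))
--                    for i, c in enumerate(dataStr[:paddedLen]))
-- ===== Notes on version B (the rewrite author's own statement) =====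
-- stated objective: alternative
-- what changed: Replaces the simulated key-padding loop, explicit chunk-slicing loop and per-chunk inner summing loop by the closed-form padded length, one prefix-sum table over the cyclic key (padded char j = keyStr[j % keyLen]), and one pass over the data taking each chunk's ord-sum as a difference of two prefix sums.
-- outside the precondition, e.g. on aselDecrypt('', 'k'): A raises ZeroDivisionError, B raises ZeroDivisionError; on aselDecrypt('a', 'z'): A raises ValueError, B raises ValueError
import Mathlib
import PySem

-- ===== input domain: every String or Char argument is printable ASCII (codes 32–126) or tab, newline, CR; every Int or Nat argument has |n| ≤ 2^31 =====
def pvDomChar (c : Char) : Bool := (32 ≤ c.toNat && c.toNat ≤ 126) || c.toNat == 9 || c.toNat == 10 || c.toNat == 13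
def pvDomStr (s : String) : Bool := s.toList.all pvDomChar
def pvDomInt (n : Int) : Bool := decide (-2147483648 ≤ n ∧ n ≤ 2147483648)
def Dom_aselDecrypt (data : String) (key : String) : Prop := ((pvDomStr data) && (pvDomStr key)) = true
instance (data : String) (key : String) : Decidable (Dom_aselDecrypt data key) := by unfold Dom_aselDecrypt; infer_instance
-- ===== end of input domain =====

-- B replaces A's simulated key-padding / chunk-slicing / per-chunk summing loops by the
-- closed-form padded length and one prefix-sum table over the cyclic key (alternative decomposition).

-- ===== PORT A =====
-- ord(c) / chr(v); chr is exact where 0 ≤ v < 0x110000, which holds at every call made on Pre_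
def pyOrd (c : Char) : Int := (c.toNat : Int)
def pyChr (v : Int) : Char := Char.ofNat v.toNat

-- prepareKey's `while modKD != 0: keyStr += keyStr[i]; …` loop; the `0 < dataLen` guard only
-- makes it total (Python raises ZeroDivisionError before the loop when dataLen = 0, excluded
-- by Pre_), and `getD i ' '` is Python's keyStr[i], always in range on reachable states.
def pvPadLoop (dataLen : Nat) (ks : List Char) (i : Nat) : List Char :=
  if h : 0 < dataLen ∧ ks.length % dataLen ≠ 0 then
    pvPadLoop dataLen (ks ++ [ks.getD i ' ']) (i + 1)
  else ks
termination_by (dataLen - ks.length % dataLen) % dataLen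
decreasing_by
  obtain ⟨hd, hm⟩ := h
  simp only [List.length_append, List.length_singleton]
  have h1 : ks.length % dataLen < dataLen := Nat.mod_lt _ hd
  have hd1 : dataLen ≠ 1 := by
    intro h; rw [h] at hm; exact hm (Nat.mod_one _)
  have hstep : (ks.length + 1) % dataLen = (ks.length % dataLen + 1) % dataLen := by
    rw [Nat.add_mod, Nat.mod_eq_of_lt (show 1 < dataLen by omega)]
  rw [hstep]
  rcases Nat.lt_or_ge (ks.length % dataLen + 1) dataLen with hc | hc
  · rw [Nat.mod_eq_of_lt hc,
      Nat.mod_eq_of_lt (show dataLen - (ks.length % dataLen + 1) < dataLen by omega),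
      Nat.mod_eq_of_lt (show dataLen - ks.length % dataLen < dataLen by omega)]
    omega
  · have he : ks.length % dataLen + 1 = dataLen := by omega
    rw [he, Nat.mod_self, Nat.sub_zero, Nat.mod_self,
      Nat.mod_eq_of_lt (show dataLen - ks.length % dataLen < dataLen by omega)]
    omega

-- prepareKey's `while run != keyLen:` chunking loop; `run < keyLen` together with the
-- `0 < chunkSize` totality guard is Python's `run != keyLen` on all reachable states
-- (chunkSize is positive and divides keyLen whenever keyLen > 0, so run hits keyLen exactly).
def pvChunkLoop (ks : List Char) (chunkSize keyLen run : Nat) : List (List Char) :=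
  if 0 < chunkSize ∧ run < keyLen then
    PySem.List.slice ks (some (run : Int)) (some ((run : Int) + (chunkSize : Int))) ::
      pvChunkLoop ks chunkSize keyLen (run + chunkSize)
  else []
termination_by keyLen - run
decreasing_by omega

def prepareKey (dataStr keyStr : List Char) : List Int :=
  let keyStr2 := pvPadLoop dataStr.length keyStr 0
  let keyLen := keyStr2.length
  let dataLen := dataStr.length
  -- int(keyLen / dataLen): exact integer since dataLen divides keyLen on reachable states
  let chunkSize := keyLen / dataLen
  let keyList := pvChunkLoop keyStr2 chunkSize keyLen 0
  keyList.foldl (fun acc chunk => acc ++ [chunk.foldl (fun a c => a + pyOrd c) 0]) []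

def aselDecrypt (data : String) (key : String) : String :=
  let dataStr := data.toList
  let ordKeyList := prepareKey dataStr key.toList
  let combinedList := (dataStr.zip ordKeyList).foldl
    (fun acc (p : Char × Int) => acc ++ [pyOrd p.1 - p.2]) []
  String.ofList (combinedList.foldl (fun acc v => acc ++ [pyChr v]) [])

-- ===== PORT B =====
def aselDecrypt_alt (data : String) (key : String) : String :=
  let dataStr := data.toList
  let keyStr := key.toList
  let dataLen := dataStr.length
  let keyLen := keyStr.length
  let paddedLen := keyLen + (dataLen - keyLen % dataLen) % dataLen
  let chunkSize := paddedLen / dataLen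
  let P : List Int := (PySem.List.pyRange 0 (paddedLen : Int) 1).foldl
    (fun P t => P ++ [PySem.List.pyGetD P (-1) 0 +
                      pyOrd (keyStr.getD (t.toNat % keyLen) ' ')]) [0]
  String.ofList ((PySem.List.enumerate (PySem.List.slice dataStr none (some (paddedLen : Int))) 0).map
    (fun p => pyChr (pyOrd p.2 -
      (PySem.List.pyGetD P ((p.1 + 1) * (chunkSize : Int)) 0 -
       PySem.List.pyGetD P (p.1 * (chunkSize : Int)) 0))))

-- ===== PRECONDITION & SPEC =====
-- helpers for Pre_: the chunk size and the i-th chunk's ord-sum of the cyclically padded key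
def pvChunkSize (dataLen keyLen : Nat) : Nat :=
  (keyLen + (dataLen - keyLen % dataLen) % dataLen) / dataLen
def pvChunkSum (key : List Char) (cs i : Nat) : Nat :=
  ((List.range cs).map (fun t => (key.getD ((i * cs + t) % key.length) ' ').toNat)).sum

-- Pre_ = exactly where the Python A returns normally: it raises ZeroDivisionError on empty data,
-- and ValueError from chr() when some data char's code is below its key chunk's ord-sum.
def Pre_aselDecrypt (data : String) (key : String) : Prop :=
  data ≠ "" ∧ (key = "" ∨ ∀ i < data.toList.length,
    pvChunkSum key.toList (pvChunkSize data.toList.length key.toList.length) i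
      ≤ (data.toList.getD i ' ').toNat)
instance (data : String) (key : String) : Decidable (Pre_aselDecrypt data key) := by
  unfold Pre_aselDecrypt; infer_instance

def pvWitness_aselDecrypt : String × String := ("zz", "a")

def Spec_aselDecrypt (data : String) (key : String) (out : String) : Prop := out = aselDecrypt_alt data key
instance (data : String) (key : String) (out : String) : Decidable (Spec_aselDecrypt data key out) := by unfold Spec_aselDecrypt; infer_instance

-- ===== CLAIM (what is proved, stated in full; the proofs are below) =====
def Claim_equal_aselDecrypt : Prop := ∀ (data : String) (key : String), Dom_aselDecrypt data key → Pre_aselDecrypt data key → Spec_aselDecrypt data key (aselDecrypt data key)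

-- ===== LEMMAS AND PROOFS =====

-- the cyclic extension of the key to m characters: padded char j is key[j % len(key)]
def pvExt (key : List Char) (m : Nat) : List Char :=
  (List.range m).map (fun j => key.getD (j % key.length) ' ')

-- the i-th chunk (of size cs) of the cyclically padded key
def pvSeg (key : List Char) (cs i : Nat) : List Char :=
  (List.range cs).map (fun u => key.getD ((i * cs + u) % key.length) ' ')

-- the ord of the u-th padded char, and the prefix sums of those ords
def pvw (key : List Char) (u : Nat) : Int := pyOrd (key.getD (u % key.length) ' ')
def pvS (key : List Char) (t : Nat) : Int := ((List.range t).map (pvw key)).sum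

theorem pvExt_length (key : List Char) (m : Nat) : (pvExt key m).length = m := by
  simp [pvExt]

theorem pvExt_self (key : List Char) : pvExt key key.length = key := by
  apply List.ext_getElem
  · simp [pvExt]
  · intro j h1 h2
    simp only [pvExt, List.getElem_map, List.getElem_range]
    rw [Nat.mod_eq_of_lt (by simpa [pvExt] using h1), List.getD_eq_getElem]

theorem pvExt_succ (key : List Char) (m : Nat) :
    pvExt key (m + 1) = pvExt key m ++ [key.getD (m % key.length) ' '] := by
  simp [pvExt, List.range_succ]

theorem pvExt_getD (key : List Char) {j m : Nat} (h : j < m) :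
    (pvExt key m).getD j ' ' = key.getD (j % key.length) ' ' :=
  PySem.List.getD_map_range _ _ _ _ h

theorem pvPadLoop_ext (key : List Char) (d : Nat) (hd : 0 < d) (hk : key ≠ []) :
    ∀ μ (m : Nat), (d - m % d) % d = μ → key.length ≤ m →
      pvPadLoop d (pvExt key m) (m - key.length) = pvExt key (m + (d - m % d) % d) := by
  have hkl : 0 < key.length := List.length_pos_iff.mpr hk
  intro μ
  induction μ using Nat.strong_induction_on with
  | _ μ IH =>
    intro m hμ hm
    by_cases h0 : m % d = 0
    · rw [pvPadLoop]
      simp [pvExt_length, h0, Nat.mod_self]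
    · have h1 : m % d < d := Nat.mod_lt _ hd
      have hd1 : d ≠ 1 := by intro h; rw [h] at h0; exact h0 (Nat.mod_one _)
      rw [pvPadLoop]
      rw [dif_pos (by simp [pvExt_length, h0, hd])]
      have hidx : (pvExt key m).getD (m - key.length) ' ' = key.getD (m % key.length) ' ' := by
        rw [pvExt_getD key (show m - key.length < m by omega)]
        congr 1
        conv_rhs => rw [show m = (m - key.length) + key.length by omega]
        rw [Nat.add_mod_right]
      rw [hidx, ← pvExt_succ, show (m - key.length) + 1 = (m + 1) - key.length by omega]
      have hstep : (m + 1) % d = (m % d + 1) % d := by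
        rw [Nat.add_mod, Nat.mod_eq_of_lt (show 1 < d by omega)]
      have a2 : (d - m % d) % d = d - m % d := Nat.mod_eq_of_lt (by omega)
      rcases Nat.lt_or_ge (m % d + 1) d with hc | hc
      · have e1 : (m + 1) % d = m % d + 1 := by rw [hstep, Nat.mod_eq_of_lt hc]
        have a1 : (d - (m + 1) % d) % d = d - (m % d + 1) := by
          rw [e1]; exact Nat.mod_eq_of_lt (by omega)
        rw [IH ((d - (m + 1) % d) % d) (by omega) (m + 1) rfl (by omega)]
        congr 1
        omega
      · have e1 : (m + 1) % d = 0 := by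
          rw [hstep, show m % d + 1 = d by omega, Nat.mod_self]
        have a1 : (d - (m + 1) % d) % d = 0 := by rw [e1, Nat.sub_zero, Nat.mod_self]
        rw [IH ((d - (m + 1) % d) % d) (by omega) (m + 1) rfl (by omega)]
        congr 1
        omega

theorem pvPadLoop_run (key : List Char) (d : Nat) (hd : 0 < d) (hk : key ≠ []) :
    pvPadLoop d key 0 = pvExt key (key.length + (d - key.length % d) % d) := by
  have h := pvPadLoop_ext key d hd hk _ key.length rfl le_rfl
  rwa [pvExt_self, Nat.sub_self] at h

theorem pvSlice_ext (key : List Char) (m a cs : Nat) (h : a + cs ≤ m) :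
    PySem.List.slice (pvExt key m) (some (a : Int)) (some ((a : Int) + (cs : Int))) =
      (List.range cs).map (fun u => key.getD ((a + u) % key.length) ' ') := by
  rw [PySem.List.slice_natCast_add]
  apply List.ext_getElem
  · simp [pvExt]; omega
  · intro u h1 h2
    simp [pvExt]

theorem pvChunkLoop_eq (key : List Char) (cs : Nat) (hcs : 0 < cs) (n : Nat) :
    ∀ (k j : Nat), k = n - j → j ≤ n →
      pvChunkLoop (pvExt key (n * cs)) cs (n * cs) (j * cs) =
        (List.range k).map (fun t => pvSeg key cs (j + t)) := by
  intro k
  induction k with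
  | zero =>
    intro j hk hj
    have hjn : j = n := by omega
    rw [pvChunkLoop]
    simp [hjn]
  | succ k ih =>
    intro j hk hj
    have hjn : j < n := by omega
    rw [pvChunkLoop]
    rw [if_pos ⟨hcs, by exact Nat.mul_lt_mul_of_lt_of_le hjn le_rfl hcs⟩]
    rw [show j * cs + cs = (j + 1) * cs by ring]
    rw [ih (j + 1) (by omega) (by omega)]
    rw [pvSlice_ext key (n * cs) (j * cs) cs (by nlinarith)]
    rw [List.range_succ_eq_map, List.map_cons, List.map_map]
    have h2 : List.map (fun t => pvSeg key cs (j + 1 + t)) (List.range k)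
        = List.map ((fun t => pvSeg key cs (j + t)) ∘ Nat.succ) (List.range k) := by
      apply List.map_congr_left
      intro t _
      simp only [Function.comp_apply]
      rw [show j + 1 + t = j + Nat.succ t by omega]
    rw [h2]
    rfl

theorem pvChunkLoop_run (key : List Char) (cs : Nat) (hcs : 0 < cs) (n : Nat) :
    pvChunkLoop (pvExt key (n * cs)) cs (n * cs) 0 = (List.range n).map (pvSeg key cs) := by
  have h := pvChunkLoop_eq key cs hcs n n 0 (by omega) (by omega)
  simpa using h

theorem pvP_eq (key : List Char) (L : Nat) :
    (PySem.List.pyRange 0 (L : Int) 1).foldl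
      (fun P t => P ++ [PySem.List.pyGetD P (-1) 0 +
                        pyOrd (key.getD (t.toNat % key.length) ' ')]) [0]
    = (List.range (L + 1)).map (pvS key) := by
  induction L with
  | zero => simp [pvS]
  | succ L ih =>
    rw [PySem.List.pyRange_zero_natCast] at ih ⊢
    rw [List.range_succ, List.map_append, List.foldl_append, ih]
    simp only [List.map_cons, List.map_nil, List.foldl_cons, List.foldl_nil]
    rw [show (List.range (L + 1)).map (pvS key) = (List.range L).map (pvS key) ++ [pvS key L] by
      rw [List.range_succ, List.map_append]; rfl]
    rw [PySem.List.pyGetD_neg_one_append_singleton]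
    rw [show (List.range (L + 1 + 1)).map (pvS key) = (List.range (L + 1)).map (pvS key) ++ [pvS key (L + 1)] by
      rw [List.range_succ (n := L + 1), List.map_append]; rfl]
    rw [List.range_succ, List.map_append]
    simp only [List.append_assoc, List.map_cons, List.map_nil]
    congr 2
    simp [pvS, List.range_succ, pvw, Int.toNat_natCast]

theorem pvS_add (key : List Char) (a b : Nat) :
    pvS key (a + b) = pvS key a + ((List.range b).map (fun u => pvw key (a + u))).sum := by
  simp [pvS, List.range_add, Function.comp_def]

theorem pvSeg_sum (key : List Char) (cs i : Nat) :
    ((pvSeg key cs i).map pyOrd).sum = pvS key ((i + 1) * cs) - pvS key (i * cs) := by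
  rw [show (i + 1) * cs = i * cs + cs by ring, pvS_add]
  simp [pvSeg, pvw, List.map_map, Function.comp_def]

theorem pvMain (D K : List Char) (hd : 0 < D.length) (hk : K ≠ []) :
    (let ordKeyList := prepareKey D K
     let combinedList := (D.zip ordKeyList).foldl
       (fun acc (p : Char × Int) => acc ++ [pyOrd p.1 - p.2]) []
     String.ofList (combinedList.foldl (fun acc v => acc ++ [pyChr v]) []))
    =
    (let dataLen := D.length
     let keyLen := K.length
     let paddedLen := keyLen + (dataLen - keyLen % dataLen) % dataLen
     let chunkSize := paddedLen / dataLen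
     let P : List Int := (PySem.List.pyRange 0 (paddedLen : Int) 1).foldl
       (fun P t => P ++ [PySem.List.pyGetD P (-1) 0 + pyOrd (K.getD (t.toNat % keyLen) ' ')]) [0]
     String.ofList ((PySem.List.enumerate (PySem.List.slice D none (some (paddedLen : Int))) 0).map
       (fun p => pyChr (pyOrd p.2 -
         (PySem.List.pyGetD P ((p.1 + 1) * (chunkSize : Int)) 0 -
          PySem.List.pyGetD P (p.1 * (chunkSize : Int)) 0))))) := by
  have hkl : 0 < K.length := List.length_pos_iff.mpr hk
  simp only [prepareKey]
  rw [pvPadLoop_run K D.length hd hk]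
  rw [pvExt_length]
  set L := K.length + (D.length - K.length % D.length) % D.length with hL
  have hmlt : K.length % D.length < D.length := Nat.mod_lt _ hd
  have hdm := Nat.div_add_mod K.length D.length
  obtain ⟨q, hq, hq1⟩ : ∃ q, L = D.length * q ∧ 1 ≤ q := by
    by_cases hr : K.length % D.length = 0
    · refine ⟨K.length / D.length, ?_, ?_⟩
      · rw [hL, hr, Nat.sub_zero, Nat.mod_self, Nat.add_zero]; omega
      · rcases Nat.eq_zero_or_pos (K.length / D.length) with h0 | h0
        · rw [h0, Nat.mul_zero] at hdm; omega
        · omega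
    · refine ⟨K.length / D.length + 1, ?_, Nat.succ_le_succ (Nat.zero_le _)⟩
      have hmul : D.length * (K.length / D.length + 1)
          = D.length * (K.length / D.length) + D.length := by ring
      rw [hL, Nat.mod_eq_of_lt (show D.length - K.length % D.length < D.length by omega)]
      omega
  have hdL : D.length ≤ L := by
    rw [hq]; exact Nat.le_mul_of_pos_right _ hq1
  have hcs : L / D.length = q := by rw [hq]; exact Nat.mul_div_cancel_left q hd
  rw [hcs]
  conv_lhs => rw [hq]
  rw [pvChunkLoop_run K q (by omega) D.length]
  rw [PySem.List.foldl_append_singleton_eq_map, List.nil_append]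
  rw [PySem.List.foldl_append_singleton_eq_map, List.nil_append]
  rw [PySem.List.foldl_append_singleton_eq_map, List.nil_append]
  rw [pvP_eq K L]
  rw [PySem.List.slice_to_natCast, List.take_of_length_le hdL]
  rw [PySem.List.enumerate_eq_map_pyRange D ' ', PySem.List.len_eq,
    PySem.List.pyRange_zero_natCast, List.map_map, List.map_map]
  apply congrArg String.ofList
  apply List.ext_getElem
  · simp
  · intro i h1 h2
    have hid : i < D.length := by simpa using h1
    simp only [List.getElem_map, List.getElem_zip, List.getElem_range, Function.comp_apply]
    rw [PySem.List.foldl_add, pvSeg_sum]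
    have hiq1 : ((i : Int) + 1) * (q : Int) = (((i + 1) * q : Nat) : Int) := by push_cast; ring
    have hiq0 : (i : Int) * (q : Int) = ((i * q : Nat) : Int) := by push_cast; ring
    rw [hiq1, hiq0, PySem.List.pyGetD_natCast, PySem.List.pyGetD_natCast,
      PySem.List.pyGetD_natCast]
    have hb1 : (i + 1) * q < L + 1 := by
      have h := Nat.mul_le_mul_right q (show i + 1 ≤ D.length by omega)
      omega
    have hb0 : i * q < L + 1 := by
      have h := Nat.mul_le_mul_right q (show i ≤ D.length by omega)
      omega
    rw [PySem.List.getD_map_range _ _ _ _ hb1, PySem.List.getD_map_range _ _ _ _ hb0]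
    rw [List.getD_eq_getElem D ' ' hid]
    ring_nf

-- ===== VERDICT (by name: the statement is the Claim_ definition above) =====
theorem aselDecrypt_spec : Claim_equal_aselDecrypt := by
  intro data key _ hpre
  unfold Spec_aselDecrypt
  obtain ⟨hne, -⟩ := hpre
  have hdl : data.toList ≠ [] := fun h => hne (String.toList_eq_nil_iff.mp h)
  have hd : 0 < data.toList.length := List.length_pos_iff.mpr hdl
  by_cases hkey : key.toList = []
  · have h0 : PySem.List.slice data.toList none (some 0) = [] := by
      have h := PySem.List.slice_to_natCast data.toList 0
      simpa using h
    simp [aselDecrypt, aselDecrypt_alt, prepareKey, hkey, pvPadLoop, pvChunkLoop, h0]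
  · exact pvMain data.toList key.toList hd hkey
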